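-- pv_equiv track=rewrite | github.com/duttbito/Tactego | project.py | insert_red_player_to_the_grid
-- ===== SOURCE A (Python) =====
-- def insert_red_player_to_the_grid(grid, h, w, player_list):
--
--     red_player_grid = grid
--     n = 0
--     #used to enter row of 2d list
--     for i in range(0, h):
--         #used to enter column of 2d list
--         for j in range(0, w):
--             if n <= len(player_list) - 1:
--                 red_player_grid[i][j] = player_list[n]
--                 n = n + 1
--
--     return red_player_grid
-- ===== SOURCE B (Python) =====
-- def insert_red_player_to_the_grid(grid, h, w, player_list):
--     m = min(len(player_list), h * w) if h > 0 and w > 0 else 0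
--     for n in range(m):
--         grid[n // w][n % w] = player_list[n]
--     return grid
-- ===== Notes on version B (the rewrite author's own statement) =====
-- stated objective: simpler
-- what changed: Replaces the nested row/column scan with a per-cell guard and running counter by a single linear loop over the players, capped at min(len(player_list), h*w), recovering each cell as (n // w, n % w).
import Mathlib
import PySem

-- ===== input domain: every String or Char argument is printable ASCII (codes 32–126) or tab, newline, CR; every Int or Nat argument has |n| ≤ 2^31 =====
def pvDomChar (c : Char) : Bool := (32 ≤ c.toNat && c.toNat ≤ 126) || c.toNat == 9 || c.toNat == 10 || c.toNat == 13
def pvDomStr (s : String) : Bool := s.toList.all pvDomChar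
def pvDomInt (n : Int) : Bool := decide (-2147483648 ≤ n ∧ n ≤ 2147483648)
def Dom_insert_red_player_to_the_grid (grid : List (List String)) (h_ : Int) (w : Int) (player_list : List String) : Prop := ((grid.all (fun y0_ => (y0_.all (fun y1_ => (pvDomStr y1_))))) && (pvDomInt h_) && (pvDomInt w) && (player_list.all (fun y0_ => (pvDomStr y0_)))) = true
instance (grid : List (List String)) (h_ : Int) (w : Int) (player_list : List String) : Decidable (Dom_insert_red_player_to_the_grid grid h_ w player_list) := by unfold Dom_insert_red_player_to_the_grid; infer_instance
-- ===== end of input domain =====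

-- B replaces A's nested row/column scan (with a per-cell guard and a running counter) by a single
-- linear loop over the players capped at min(len, h*w), recovering each cell as (n // w, n % w).
-- Both Pythons mutate `grid` in place and return the same (aliased) object; the equivalence proved
-- here is about the returned value.

-- ===== PORT A =====
def insert_red_player_to_the_grid (grid : List (List String)) (h_ : Int) (w : Int) (player_list : List String) : List (List String) :=
  ((PySem.List.pyRange 0 h_ 1).foldl (fun (st : List (List String) × Int) i =>
      (PySem.List.pyRange 0 w 1).foldl (fun (st : List (List String) × Int) j =>
        if st.2 ≤ (player_list.length : Int) - 1 then
          (st.1.set i.toNat ((st.1.getD i.toNat []).set j.toNat (PySem.List.pyGetD player_list st.2 "")), st.2 + 1)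
        else st) st)
    (grid, (0 : Int))).1

-- ===== PORT B =====
def insert_red_player_to_the_grid_alt (grid : List (List String)) (h_ : Int) (w : Int) (player_list : List String) : List (List String) :=
  let m : Int := if 0 < h_ ∧ 0 < w then min (player_list.length : Int) (h_ * w) else 0
  (PySem.List.pyRange 0 m 1).foldl (fun g n =>
      g.set (PySem.Int.floordiv n w).toNat
        ((g.getD (PySem.Int.floordiv n w).toNat []).set (PySem.Int.mod n w).toNat
          (PySem.List.pyGetD player_list n ""))) grid

-- ===== PRECONDITION & SPEC =====
-- Pre_ excludes exactly the inputs on which Python A raises IndexError: some player would be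
-- assigned to a cell (n // w, n % w) that lies outside the given grid.
def Pre_insert_red_player_to_the_grid (grid : List (List String)) (h_ : Int) (w : Int) (player_list : List String) : Prop :=
  ∀ n ∈ List.range (min player_list.length (h_.toNat * w.toNat)),
    n / w.toNat < grid.length ∧ n % w.toNat < (grid.getD (n / w.toNat) []).length
instance (grid : List (List String)) (h_ : Int) (w : Int) (player_list : List String) : Decidable (Pre_insert_red_player_to_the_grid grid h_ w player_list) := by unfold Pre_insert_red_player_to_the_grid; infer_instance
def pvWitness_insert_red_player_to_the_grid : List (List String) × Int × Int × List String :=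
  ([["x", "x"], ["x", "x"]], 2, 2, ["a", "b", "c"])

def Spec_insert_red_player_to_the_grid (grid : List (List String)) (h_ : Int) (w : Int) (player_list : List String) (out : List (List String)) : Prop := out = insert_red_player_to_the_grid_alt grid h_ w player_list
instance (grid : List (List String)) (h_ : Int) (w : Int) (player_list : List String) (out : List (List String)) : Decidable (Spec_insert_red_player_to_the_grid grid h_ w player_list out) := by unfold Spec_insert_red_player_to_the_grid; infer_instance

-- ===== CLAIM (what is proved, stated in full; the proofs are below) =====
def Claim_equal_insert_red_player_to_the_grid : Prop := ∀ (grid : List (List String)) (h_ : Int) (w : Int) (player_list : List String), Dom_insert_red_player_to_the_grid grid h_ w player_list → Pre_insert_red_player_to_the_grid grid h_ w player_list → Spec_insert_red_player_to_the_grid grid h_ w player_list (insert_red_player_to_the_grid grid h_ w player_list)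

-- ===== LEMMAS AND PROOFS =====

-- A's inner-loop body, with the loop index already in Nat form.
def stepA (pl : List String) (i : Nat) (st : List (List String) × Int) (j : Nat) : List (List String) × Int :=
  if st.2 ≤ (pl.length : Int) - 1 then
    (st.1.set i ((st.1.getD i []).set j (PySem.List.pyGetD pl st.2 "")), st.2 + 1)
  else st

-- B's loop body, with the loop index already in Nat form.
def bStep (pl : List String) (W : Nat) (g : List (List String)) (n : Nat) : List (List String) :=
  g.set (n / W) ((g.getD (n / W) []).set (n % W) (pl.getD n ""))

-- B's loop run over counters s, s+1, …, t-1.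
def bRun (pl : List String) (W : Nat) (g : List (List String)) (s t : Nat) : List (List String) :=
  (List.range' s (t - s)).foldl (bStep pl W) g

lemma bRun_self (pl : List String) (W : Nat) (g : List (List String)) (s : Nat) :
    bRun pl W g s s = g := by simp [bRun]

lemma bRun_cons (pl : List String) (W : Nat) (g : List (List String)) (s t : Nat) (h : s < t) :
    bRun pl W g s t = bRun pl W (bStep pl W g s) (s + 1) t := by
  unfold bRun
  rw [show t - s = (t - (s + 1)) + 1 from by omega, List.range'_succ, List.foldl_cons]

lemma bRun_comp (pl : List String) (W : Nat) (g : List (List String)) (s t u : Nat)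
    (h1 : s ≤ t) (h2 : t ≤ u) :
    bRun pl W (bRun pl W g s t) t u = bRun pl W g s u := by
  unfold bRun
  rw [← List.foldl_append]
  congr 1
  have happ : List.range' s (t - s) ++ List.range' (s + 1 * (t - s)) (u - t)
      = List.range' s ((t - s) + (u - t)) := List.range'_append
  rw [show s + 1 * (t - s) = t from by omega] at happ
  rw [show u - s = (t - s) + (u - t) from by omega, ← happ]

lemma deadA (pl : List String) (i : Nat) (n : Int) (h : ¬ n ≤ (pl.length : Int) - 1) :
    ∀ (js : List Nat) (g : List (List String)), js.foldl (stepA pl i) (g, n) = (g, n) := by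
  intro js
  induction js with
  | nil => intro g; rfl
  | cons j js ih =>
    intro g
    simp only [List.foldl_cons, stepA]
    rw [if_neg h]
    exact ih g

lemma innerA (pl : List String) (W i : Nat) :
    ∀ (c j0 : Nat) (g : List (List String)), j0 + c ≤ W → i * W + j0 ≤ pl.length →
    (List.range' j0 c).foldl (stepA pl i) (g, ((i * W + j0 : Nat) : Int))
      = (bRun pl W g (i * W + j0) (min (i * W + j0 + c) pl.length),
         ((min (i * W + j0 + c) pl.length : Nat) : Int)) := by
  intro c
  induction c with
  | zero =>
    intro j0 g _ hle
    simp [Nat.min_eq_left hle, bRun_self]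
  | succ c ih =>
    intro j0 g hjc hle
    rw [List.range'_succ, List.foldl_cons]
    by_cases hlt : i * W + j0 < pl.length
    · have hg : ((i * W + j0 : Nat) : Int) ≤ (pl.length : Int) - 1 := by push_cast; omega
      have hjW : j0 < W := by omega
      have hdiv : (i * W + j0) / W = i := by
        rw [Nat.add_comm, Nat.add_mul_div_right _ _ (by omega : 0 < W),
          Nat.div_eq_of_lt hjW, Nat.zero_add]
      have hmod : (i * W + j0) % W = j0 := by
        rw [Nat.add_comm, Nat.add_mul_mod_self_right, Nat.mod_eq_of_lt hjW]
      simp only [stepA]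
      rw [if_pos hg]
      simp only [PySem.List.pyGetD_natCast]
      rw [show ((i * W + j0 : Nat) : Int) + 1 = ((i * W + (j0 + 1) : Nat) : Int) from by push_cast; ring]
      rw [ih (j0 + 1) _ (by omega) (by omega)]
      rw [show min (i * W + (j0 + 1) + c) pl.length = min (i * W + j0 + (c + 1)) pl.length from by omega]
      congr 1
      rw [bRun_cons pl W g _ _ (by omega)]
      rw [show i * W + j0 + 1 = i * W + (j0 + 1) from by omega]
      congr 1
      simp [bStep, hdiv, hmod]
    · have hg : ¬ ((i * W + j0 : Nat) : Int) ≤ (pl.length : Int) - 1 := by push_cast; omega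
      simp only [stepA]
      rw [if_neg hg]
      rw [deadA pl i _ hg]
      rw [show min (i * W + j0 + (c + 1)) pl.length = i * W + j0 from by omega, bRun_self]

lemma outerA (pl : List String) (W : Nat) :
    ∀ (r i0 : Nat) (g : List (List String)),
    (List.range' i0 r).foldl
        (fun st i => (List.range' 0 W).foldl (stepA pl i) st)
        (g, ((min (i0 * W) pl.length : Nat) : Int))
      = (bRun pl W g (min (i0 * W) pl.length) (min ((i0 + r) * W) pl.length),
         ((min ((i0 + r) * W) pl.length : Nat) : Int)) := by
  intro r
  induction r with
  | zero => intro i0 g; simp [bRun_self]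
  | succ r ih =>
    intro i0 g
    rw [List.range'_succ, List.foldl_cons]
    by_cases hle : i0 * W ≤ pl.length
    · have hmin0 : min (i0 * W) pl.length = i0 * W := by omega
      rw [hmin0]
      have hin := innerA pl W i0 W 0 g (by omega) (by omega)
      simp only [Nat.add_zero] at hin
      rw [hin]
      rw [show i0 * W + W = (i0 + 1) * W from by ring]
      rw [ih (i0 + 1)]
      rw [show (i0 + 1 + r) * W = (i0 + (r + 1)) * W from by ring]
      congr 1
      apply bRun_comp
      · have hmul : i0 * W ≤ (i0 + 1) * W := Nat.mul_le_mul_right _ (by omega)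
        omega
      · have : (i0 + 1) * W ≤ (i0 + (r + 1)) * W := Nat.mul_le_mul_right _ (by omega)
        omega
    · have hmin0 : min (i0 * W) pl.length = pl.length := by omega
      rw [hmin0]
      have hg : ¬ ((pl.length : Nat) : Int) ≤ (pl.length : Int) - 1 := by omega
      rw [deadA pl i0 _ hg]
      have h1 : min ((i0 + 1) * W) pl.length = pl.length := by
        have : i0 * W ≤ (i0 + 1) * W := Nat.mul_le_mul_right _ (by omega)
        omega
      have hstep := ih (i0 + 1) g
      rw [h1] at hstep
      rw [hstep, show (i0 + 1 + r) * W = (i0 + (r + 1)) * W from by ring]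

-- Normalize A's port to the Nat-indexed nested fold.
lemma portA_eq (grid : List (List String)) (h_ w : Int) (pl : List String) :
    insert_red_player_to_the_grid grid h_ w pl
      = ((List.range' 0 h_.toNat).foldl
          (fun st i => (List.range' 0 w.toNat).foldl (stepA pl i) st)
          (grid, (0 : Int))).1 := by
  unfold insert_red_player_to_the_grid
  rw [PySem.List.pyRange_one 0 h_, PySem.List.pyRange_one 0 w]
  simp only [Int.sub_zero, List.foldl_map, zero_add, Int.toNat_natCast, List.range_eq_range']
  rfl

-- ===== VERDICT (by name: the statement is the Claim_ definition above) =====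
theorem insert_red_player_to_the_grid_spec : Claim_equal_insert_red_player_to_the_grid := by
  intro grid h_ w pl _ _
  unfold Spec_insert_red_player_to_the_grid insert_red_player_to_the_grid_alt
  rw [portA_eq]
  by_cases hpos : 0 < h_ ∧ 0 < w
  · obtain ⟨hh, hw⟩ := hpos
    have hw' : (w.toNat : Int) = w := Int.toNat_of_nonneg (by omega)
    have hh' : (h_.toNat : Int) = h_ := Int.toNat_of_nonneg (by omega)
    have hm : min (pl.length : Int) (h_ * w) = ((min pl.length (h_.toNat * w.toNat) : Nat) : Int) := by
      push_cast
      rw [hh', hw']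
    simp only [if_pos (And.intro hh hw), hm]
    rw [PySem.List.pyRange_one]
    simp only [Int.sub_zero, Int.toNat_natCast, List.foldl_map, zero_add]
    have hbody : (fun (g : List (List String)) (k : Nat) =>
        g.set (PySem.Int.floordiv (k : Int) w).toNat
          ((g.getD (PySem.Int.floordiv (k : Int) w).toNat []).set
            (PySem.Int.mod (k : Int) w).toNat (PySem.List.pyGetD pl (k : Int) "")))
        = bStep pl w.toNat := by
      funext g k
      rw [← hw', PySem.Int.floordiv_natCast, PySem.Int.mod_natCast, PySem.List.pyGetD_natCast]
      simp only [Int.toNat_natCast, bStep]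
    rw [hbody]
    rw [show ((0 : Int)) = ((min (0 * w.toNat) pl.length : Nat) : Int) from by simp]
    rw [outerA pl w.toNat h_.toNat 0 grid]
    simp only [Nat.zero_mul, Nat.zero_add, Nat.zero_min]
    rw [Nat.min_comm pl.length]
    unfold bRun
    simp [List.range_eq_range']
  · simp only [if_neg hpos]
    rw [show (PySem.List.pyRange 0 0 1) = [] from PySem.List.pyRange_one_eq_nil (le_refl 0)]
    simp only [List.foldl_nil]
    rcases (by omega : h_ ≤ 0 ∨ w ≤ 0 ∧ 0 < h_) with hhle | ⟨hwle, _⟩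
    · rw [show h_.toNat = 0 from by omega]
      simp
    · rw [show w.toNat = 0 from by omega]
      simp only [List.range'_zero, List.foldl_nil]
      rw [List.foldl_fixed]
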